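-- pv_equiv track=rewrite | github.com/sankalpdayal/taskManager | PythonScripts/UtilFuns.py | checkForDays
-- ===== SOURCE A (Python) =====
-- def checkForKeyWord(line, keyword, position = -1):
-- 	if len(line) == 0:
-- 		return False
-- 	if position == -1:
-- 		return (line.find(keyword) !=-1)
-- 	else:
-- 		if position > len(line):
-- 			return False
-- 		else:
-- 			return line[position:(position+len(keyword))] == keyword
--
-- def checkForKeyWordWithSeparation(line, keyword):
-- 	if line == keyword:
-- 		return True
-- 	if checkForKeyWord(line, ' ' + keyword + ' '):
-- 		return True
-- 	if checkForKeyWord(line, ',' + keyword + ' '):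
-- 		return True
-- 	if checkForKeyWord(line, ',' + keyword + ','):
-- 		return True
-- 	if checkForKeyWord(line, ' ' + keyword + ','):
-- 		return True
-- 	if checkForKeyWord(line, ' ' + keyword,len(line)-len(keyword)-1):
-- 		return True
-- 	if checkForKeyWord(line, ',' + keyword,len(line)-len(keyword)-1):
-- 		return True
-- 	if checkForKeyWord(line, keyword + ',',0):
-- 		return True
-- 	if checkForKeyWord(line, keyword + ' ',0):
-- 		return True
--
-- 	return False
--
-- def checkForDays(dayString):
-- 	if checkForKeyWordWithSeparation(dayString, 'Everyday'):
-- 		return 1111111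
-- 	if checkForKeyWordWithSeparation(dayString, 'Daily'):
-- 		return 1111111
--
-- 	days = ['Monday','Tuesday','Wednesday','Thursday','Friday','Saturday','Sunday']
-- 	day_index = 0
-- 	dates = 0
-- 	for day in days:
-- 		if checkForKeyWordWithSeparation(dayString, day):
-- 			dates += 10**day_index
-- 		day_index+=1
--
-- 	if dates == 0:
-- 		dates = -1
-- 	return dates
-- ===== SOURCE B (Python) =====
-- def checkForDays(dayString):
--     # Single left-to-right scan: cut the string into separator-delimited tokens on
--     # the fly and look each finished token up, instead of 9 positional substring
--     # probes per keyword as in the original.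
--     days = ['Monday', 'Tuesday', 'Wednesday', 'Thursday', 'Friday', 'Saturday', 'Sunday']
--     found = set()
--     cur = ''
--     for c in dayString + ' ':
--         if c == ' ' or c == ',':
--             if cur == 'Everyday' or cur == 'Daily':
--                 return 1111111
--             if cur in days:
--                 found.add(days.index(cur))
--             cur = ''
--         else:
--             cur = cur + c
--     if not found:
--         return -1
--     return sum(10 ** i for i in found)
-- ===== Notes on version B (the rewrite author's own statement) =====
-- stated objective: alternative
-- what changed: Replaces the nine positional substring probes per keyword (find/slice checks for every separator combination) by a single left-to-right scan that splits the string once at separator characters and looks each finished token up in the fixed day list.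
import Mathlib
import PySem

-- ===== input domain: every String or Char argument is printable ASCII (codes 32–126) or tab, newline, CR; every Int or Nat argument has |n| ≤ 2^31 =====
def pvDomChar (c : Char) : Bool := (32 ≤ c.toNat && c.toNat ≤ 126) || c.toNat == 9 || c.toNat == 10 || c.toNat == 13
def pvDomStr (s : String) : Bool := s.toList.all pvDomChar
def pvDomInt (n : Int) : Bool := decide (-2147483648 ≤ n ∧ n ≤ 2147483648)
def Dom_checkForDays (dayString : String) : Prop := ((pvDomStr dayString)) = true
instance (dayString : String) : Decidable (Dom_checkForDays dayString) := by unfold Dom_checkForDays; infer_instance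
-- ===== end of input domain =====

set_option maxHeartbeats 1000000


-- B replaces A's nine positional substring probes per keyword by a single left-to-right
-- tokenising scan of the string (objective: alternative algorithm, same result).

-- ===== PORT A =====
-- checkForKeyWord(line, keyword, position=-1)
def pvCheckForKeyWord (line keyword : List Char) (position : Int) : Bool :=
  if line.length = 0 then false
  else if position = -1 then PySem.Chars.find line keyword != -1
  else if position > (line.length : Int) then false
  else PySem.List.slice line (some position) (some (position + (keyword.length : Int))) == keyword

-- checkForKeyWordWithSeparation(line, keyword)
def pvSepCheck (line keyword : List Char) : Bool :=
  if line == keyword then true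
  else if pvCheckForKeyWord line (' ' :: (keyword ++ [' '])) (-1) then true
  else if pvCheckForKeyWord line (',' :: (keyword ++ [' '])) (-1) then true
  else if pvCheckForKeyWord line (',' :: (keyword ++ [','])) (-1) then true
  else if pvCheckForKeyWord line (' ' :: (keyword ++ [','])) (-1) then true
  else if pvCheckForKeyWord line (' ' :: keyword) ((line.length : Int) - (keyword.length : Int) - 1) then true
  else if pvCheckForKeyWord line (',' :: keyword) ((line.length : Int) - (keyword.length : Int) - 1) then true
  else if pvCheckForKeyWord line (keyword ++ [',']) 0 then true
  else if pvCheckForKeyWord line (keyword ++ [' ']) 0 then true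
  else false

def pvDaysA : List (List Char) :=
  ["Monday".toList, "Tuesday".toList, "Wednesday".toList, "Thursday".toList,
   "Friday".toList, "Saturday".toList, "Sunday".toList]

def checkForDays (dayString : String) : Int :=
  if pvSepCheck dayString.toList "Everyday".toList then 1111111
  else if pvSepCheck dayString.toList "Daily".toList then 1111111
  else
    let st := pvDaysA.foldl (fun (p : Int × Nat) day =>
      (if pvSepCheck dayString.toList day then p.1 + 10 ^ p.2 else p.1, p.2 + 1)) (0, 0)
    if st.1 = 0 then -1 else st.1

-- ===== PORT B =====
def pvDaysB : List (List Char) :=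
  ["Monday".toList, "Tuesday".toList, "Wednesday".toList, "Thursday".toList,
   "Friday".toList, "Saturday".toList, "Sunday".toList]

-- the "for c in dayString + ' '" loop of Source B; the early "return 1111111" is `none`
def pvScan : List Char → PySem.Set Int → List Char → Option (PySem.Set Int)
  | [], found, _cur => some found
  | c :: rest, found, cur =>
    if c = ' ' || c = ',' then
      if cur == "Everyday".toList || cur == "Daily".toList then none
      else
        match PySem.List.index? pvDaysB cur with
        | some i => pvScan rest (PySem.Set.add found (i : Int)) []
        | none => pvScan rest found []
    else
      pvScan rest found (cur ++ [c])

def checkForDays_alt (dayString : String) : Int :=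
  match pvScan (dayString.toList ++ [' ']) PySem.Set.empty [] with
  | none => 1111111
  | some found =>
    if found = [] then -1
    else (found.map (fun i => (10 : Int) ^ i.toNat)).sum

-- ===== PRECONDITION & SPEC =====
def Spec_checkForDays (dayString : String) (out : Int) : Prop := out = checkForDays_alt dayString
instance (dayString : String) (out : Int) : Decidable (Spec_checkForDays dayString out) := by unfold Spec_checkForDays; infer_instance

-- ===== CLAIM (what is proved, stated in full; the proofs are below) =====
def Claim_equal_checkForDays : Prop := ∀ (dayString : String), Dom_checkForDays dayString → Spec_checkForDays dayString (checkForDays dayString)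

-- ===== LEMMAS AND PROOFS =====

-- separator-free words
def pvFree (w : List Char) : Prop := ∀ c ∈ w, c ≠ ' ' ∧ c ≠ ','

-- "w occurs as a complete ' '/','-delimited token of l"
def pvTok (w l : List Char) : Prop :=
  ∃ u v, l = u ++ w ++ v ∧
    (u = [] ∨ ∃ u' c, (c = ' ' ∨ c = ',') ∧ u = u' ++ [c]) ∧
    (v = [] ∨ ∃ c v', (c = ' ' ∨ c = ',') ∧ v = c :: v')

theorem kw_infix (l pat : List Char) (hpat : pat ≠ []) :
    pvCheckForKeyWord l pat (-1) = true ↔ pat <:+: l := by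
  unfold pvCheckForKeyWord
  by_cases h : l.length = 0
  · have : l = [] := List.eq_nil_of_length_eq_zero h
    subst this
    simp [List.infix_nil, hpat]
  · simp only [h, if_false, if_true, bne_iff_ne, ne_eq]
    exact PySem.Chars.find_ne_neg_one_iff l pat

theorem kw_suffix (l w : List Char) (s : Char) :
    pvCheckForKeyWord l (s :: w) ((l.length : Int) - (w.length : Int) - 1) = true ↔ (s :: w) <:+ l := by
  unfold pvCheckForKeyWord
  by_cases h0 : l.length = 0
  · have : l = [] := List.eq_nil_of_length_eq_zero h0
    subst this
    simp
  · simp only [h0, if_false]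
    by_cases hpos : ((l.length : Int) - (w.length : Int) - 1) = -1
    · -- l.length = w.length: pattern is one char longer than the string, both sides false
      have hf1 : ¬ (s :: w) <:+: l := by
        intro hin
        have := hin.length_le
        simp at this; omega
      have hf2 : ¬ (s :: w) <:+ l := by
        intro hsuf
        have := hsuf.length_le
        simp at this; omega
      have hfind : PySem.Chars.find l (s :: w) = -1 :=
        (PySem.Chars.find_eq_neg_one_iff l (s :: w)).mpr hf1
      simp [hpos, hfind, hf2]
    · simp only [hpos, if_false]
      have hng : ¬ ((l.length : Int) - (w.length : Int) - 1 > (l.length : Int)) := by omega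
      simp only [hng, if_false]
      by_cases hge : w.length + 1 ≤ l.length
      · have ha : (0 : Int) ≤ (l.length : Int) - (w.length : Int) - 1 := by omega
        have hb : (0 : Int) ≤ ((l.length : Int) - (w.length : Int) - 1) + (((s :: w).length : Int)) := by
          simp only [List.length_cons]; push_cast; omega
        rw [PySem.List.slice_toNat l ha hb]
        have htn : ((l.length : Int) - (w.length : Int) - 1).toNat = l.length - (w.length + 1) := by omega
        have htk : (((l.length : Int) - (w.length : Int) - 1) + (((s :: w).length : Int))).toNat
            - ((l.length : Int) - (w.length : Int) - 1).toNat = w.length + 1 := by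
          simp only [List.length_cons]; push_cast; omega
        rw [htk, htn]
        have hdl : (l.drop (l.length - (w.length + 1))).length = w.length + 1 := by
          simp; omega
        rw [List.take_of_length_le (le_of_eq hdl)]
        rw [beq_iff_eq]
        rw [List.suffix_iff_eq_drop]
        have hlen : l.length - (s :: w).length = l.length - (w.length + 1) := by simp
        rw [hlen]
        constructor
        · intro he; exact he.symm
        · intro he; exact he.symm
      · -- pattern longer than the string: both sides false by length
        have hf2 : ¬ (s :: w) <:+ l := by
          intro hsuf
          have := hsuf.length_le
          simp at this; omega
        simp only [hf2, iff_false]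
        intro hbe
        rw [beq_iff_eq] at hbe
        have hlc := congrArg List.length hbe
        rw [PySem.List.length_slice] at hlc
        have h1 := PySem.List.clampIdx_le l.length
          (((l.length : Int) - (w.length : Int) - 1) + (((s :: w).length : Int)))
        simp at hlc
        omega

theorem kw_prefix (l w' : List Char) (hw' : w' ≠ []) :
    pvCheckForKeyWord l w' 0 = true ↔ w' <+: l := by
  unfold pvCheckForKeyWord
  by_cases h0 : l.length = 0
  · have : l = [] := List.eq_nil_of_length_eq_zero h0
    subst this
    simp [hw']
  · have h1 : ¬ ((0 : Int) = -1) := by omega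
    have h2 : ¬ ((0 : Int) > (l.length : Int)) := by omega
    simp only [h0, if_false, h1, h2]
    rw [PySem.List.slice_toNat l le_rfl (by omega)]
    simp only [zero_add, Int.toNat_natCast]
    rw [beq_iff_eq, List.prefix_iff_eq_take]
    constructor
    · intro he; exact he.symm
    · intro he; exact he.symm

theorem sep_iff_tok (l w : List Char) :
    pvSepCheck l w = true ↔ pvTok w l := by
  have h2 := kw_infix l (' ' :: (w ++ [' '])) (by simp)
  have h3 := kw_infix l (',' :: (w ++ [' '])) (by simp)
  have h4 := kw_infix l (',' :: (w ++ [','])) (by simp)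
  have h5 := kw_infix l (' ' :: (w ++ [','])) (by simp)
  have h6 := kw_suffix l w ' '
  have h7 := kw_suffix l w ','
  have h8 := kw_prefix l (w ++ [',']) (by simp)
  have h9 := kw_prefix l (w ++ [' ']) (by simp)
  have hocc : pvSepCheck l w = true ↔
      (l = w ∨ (' ' :: (w ++ [' '])) <:+: l ∨ (',' :: (w ++ [' '])) <:+: l ∨
       (',' :: (w ++ [','])) <:+: l ∨ (' ' :: (w ++ [','])) <:+: l ∨
       (' ' :: w) <:+ l ∨ (',' :: w) <:+ l ∨ (w ++ [',']) <+: l ∨ (w ++ [' ']) <+: l) := by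
    unfold pvSepCheck
    rw [← h2, ← h3, ← h4, ← h5, ← h6, ← h7, ← h8, ← h9]
    rw [show (l = w) = ((l == w) = true) by simp [beq_iff_eq]]
    split_ifs with g1 g2 g3 g4 g5 g6 g7 g8 g9 <;> simp_all
  rw [hocc]
  constructor
  · rintro (rfl | hin | hin | hin | hin | hsf | hsf | hpf | hpf)
    · exact ⟨[], [], by simp, Or.inl rfl, Or.inl rfl⟩
    · obtain ⟨a, b, hab⟩ := hin
      exact ⟨a ++ [' '], ' ' :: b, by rw [← hab]; simp, Or.inr ⟨a, ' ', Or.inl rfl, rfl⟩,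
        Or.inr ⟨' ', b, Or.inl rfl, rfl⟩⟩
    · obtain ⟨a, b, hab⟩ := hin
      exact ⟨a ++ [','], ' ' :: b, by rw [← hab]; simp, Or.inr ⟨a, ',', Or.inr rfl, rfl⟩,
        Or.inr ⟨' ', b, Or.inl rfl, rfl⟩⟩
    · obtain ⟨a, b, hab⟩ := hin
      exact ⟨a ++ [','], ',' :: b, by rw [← hab]; simp, Or.inr ⟨a, ',', Or.inr rfl, rfl⟩,
        Or.inr ⟨',', b, Or.inr rfl, rfl⟩⟩
    · obtain ⟨a, b, hab⟩ := hin
      exact ⟨a ++ [' '], ',' :: b, by rw [← hab]; simp, Or.inr ⟨a, ' ', Or.inl rfl, rfl⟩,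
        Or.inr ⟨',', b, Or.inr rfl, rfl⟩⟩
    · obtain ⟨a, ha⟩ := hsf
      exact ⟨a ++ [' '], [], by rw [← ha]; simp, Or.inr ⟨a, ' ', Or.inl rfl, rfl⟩, Or.inl rfl⟩
    · obtain ⟨a, ha⟩ := hsf
      exact ⟨a ++ [','], [], by rw [← ha]; simp, Or.inr ⟨a, ',', Or.inr rfl, rfl⟩, Or.inl rfl⟩
    · obtain ⟨b, hb⟩ := hpf
      exact ⟨[], ',' :: b, by rw [← hb]; simp, Or.inl rfl, Or.inr ⟨',', b, Or.inr rfl, rfl⟩⟩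
    · obtain ⟨b, hb⟩ := hpf
      exact ⟨[], ' ' :: b, by rw [← hb]; simp, Or.inl rfl, Or.inr ⟨' ', b, Or.inl rfl, rfl⟩⟩
  · rintro ⟨u, v, heq, hu | ⟨u', c, hcsep, rfl⟩, hv | ⟨d, v', hdsep, rfl⟩⟩
    · subst hu; subst hv; left; simpa using heq
    · subst hu
      rcases hdsep with rfl | rfl
      · right; right; right; right; right; right; right; right
        exact ⟨v', by rw [heq]; simp⟩
      · right; right; right; right; right; right; right; left
        exact ⟨v', by rw [heq]; simp⟩
    · subst hv
      rcases hcsep with rfl | rfl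
      · right; right; right; right; right; left
        exact ⟨u', by rw [heq]; simp⟩
      · right; right; right; right; right; right; left
        exact ⟨u', by rw [heq]; simp⟩
    · rcases hcsep with rfl | rfl <;> rcases hdsep with rfl | rfl
      · right; left; exact ⟨u', v', by rw [heq]; simp⟩
      · right; right; right; right; left; exact ⟨u', v', by rw [heq]; simp⟩
      · right; right; left; exact ⟨u', v', by rw [heq]; simp⟩
      · right; right; right; left; exact ⟨u', v', by rw [heq]; simp⟩

theorem tok_nil (w cur : List Char) (hc : pvFree cur) :
    pvTok w cur ↔ w = cur := by
  constructor
  · rintro ⟨u, v, heq, hu, hv⟩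
    have hu0 : u = [] := by
      rcases hu with h | ⟨u', c, hcsep, rfl⟩
      · exact h
      · exfalso
        have hcmem : c ∈ cur := by rw [heq]; simp
        rcases hc c hcmem with ⟨h1, h2⟩
        rcases hcsep with rfl | rfl <;> simp_all
    subst hu0
    have hv0 : v = [] := by
      rcases hv with h | ⟨c, v', hcsep, rfl⟩
      · exact h
      · exfalso
        have hcmem : c ∈ cur := by rw [heq]; simp
        rcases hc c hcmem with ⟨h1, h2⟩
        rcases hcsep with rfl | rfl <;> simp_all
    subst hv0
    simpa using heq.symm
  · rintro rfl
    exact ⟨[], [], by simp, Or.inl rfl, Or.inl rfl⟩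

theorem tok_flush (w cur cs : List Char) (c : Char) (hcsep : c = ' ' ∨ c = ',')
    (hw : w ≠ []) (hf : pvFree w) (hc : pvFree cur) :
    pvTok w (cur ++ c :: cs) ↔ w = cur ∨ pvTok w cs := by
  constructor
  · rintro ⟨u, v, heq, hu, hv⟩
    have hupre : u <+: cur ++ c :: cs := ⟨w ++ v, by rw [← List.append_assoc]; exact heq.symm⟩
    have hcurpre : cur <+: cur ++ c :: cs := ⟨c :: cs, rfl⟩
    rcases lt_trichotomy u.length cur.length with hlen | hlen | hlen
    · -- u is a proper prefix of cur, so u = [] (cur is separator-free)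
      have hucur : u <+: cur := List.prefix_of_prefix_length_le hupre hcurpre (le_of_lt hlen)
      have hu0 : u = [] := by
        rcases hu with h | ⟨u', d, hdsep, rfl⟩
        · exact h
        · exfalso
          have : d ∈ cur := hucur.subset (by simp)
          rcases hc d this with ⟨h1, h2⟩
          rcases hdsep with rfl | rfl <;> simp_all
      subst hu0
      simp only [List.nil_append] at heq
      have hwpre : w <+: cur ++ c :: cs := ⟨v, heq.symm⟩
      rcases lt_trichotomy w.length cur.length with hwl | hwl | hwl
      · -- w a proper prefix of cur: the head of v lies inside cur, non-separator
        exfalso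
        have hwcur : w <+: cur := List.prefix_of_prefix_length_le hwpre hcurpre (le_of_lt hwl)
        rcases hv with rfl | ⟨d, v', hdsep, rfl⟩
        · have := congrArg List.length heq
          simp at this; omega
        · have hd : d ∈ cur := by
            have h1 : cur ++ c :: cs = w ++ d :: v' := heq
            have h2 : cur = w ++ [d] ++ (cur.drop (w.length + 1)) := by
              obtain ⟨t, ht⟩ := hwcur
              rcases t with _ | ⟨e, t'⟩
              · exfalso; have := congrArg List.length ht; simp at this; omega
              · have he : cur = w ++ e :: t' := ht.symm
                have : w ++ e :: (t' ++ c :: cs) = w ++ d :: v' := by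
                  simpa [he] using h1
                have hed : e = d := by
                  have := List.append_inj_right this rfl
                  simpa using (List.cons.injEq .. ▸ this).1
                subst hed
                rw [he]; simp
            rw [h2]; simp
          rcases hc d hd with ⟨h1, h2⟩
          rcases hdsep with rfl | rfl <;> simp_all
      · -- w = cur
        left
        exact List.IsPrefix.eq_of_length (List.prefix_of_prefix_length_le hwpre hcurpre (le_of_eq hwl)) hwl
      · -- w strictly longer than cur: w would contain the separator c
        exfalso
        have hpre2 : cur ++ [c] <+: cur ++ c :: cs := by simp
        have : cur ++ [c] <+: w := List.prefix_of_prefix_length_le hpre2 hwpre (by simp; omega)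
        have : c ∈ w := this.subset (by simp)
        rcases hf c this with ⟨h1, h2⟩
        rcases hcsep with rfl | rfl <;> simp_all
    · -- u = cur: w would start with the separator c
      exfalso
      have hucur : u = cur :=
        List.IsPrefix.eq_of_length (List.prefix_of_prefix_length_le hupre hcurpre (le_of_eq hlen)) hlen
      subst hucur
      have : c :: cs = w ++ v := by
        have := heq
        rw [List.append_assoc] at this
        exact List.append_cancel_left this
      have hcw : c ∈ w := by
        rcases w with _ | ⟨e, w'⟩
        · exact absurd rfl hw
        · simp at this; simp [this.1]
      rcases hf c hcw with ⟨h1, h2⟩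
      rcases hcsep with rfl | rfl <;> simp_all
    · -- u extends past the separator: the occurrence lies inside cs
      right
      have hpre2 : cur ++ [c] <+: cur ++ c :: cs := by simp
      have hcu : cur ++ [c] <+: u := List.prefix_of_prefix_length_le hpre2 hupre (by simp; omega)
      obtain ⟨u', hu'⟩ := hcu
      have hcs : cs = u' ++ w ++ v := by
        have : cur ++ c :: cs = (cur ++ [c] ++ u') ++ w ++ v := by rw [hu']; exact heq
        simp only [List.append_assoc, List.cons_append,
          List.append_cancel_left_eq, List.cons.injEq, true_and] at this
        simp [this]
      refine ⟨u', v, hcs, ?_, hv⟩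
      rcases u' with _ | _
      · exact Or.inl rfl
      rcases hu with rfl | ⟨u'', d, hdsep, hud⟩
      · simp at hu'
      · right
        rename_i e u'''
        have hne : (e :: u''' : List Char) ≠ [] := by simp
        obtain ⟨q, d', hqd⟩ := List.eq_nil_or_concat (e :: u''') |>.resolve_left hne
        rw [List.concat_eq_append] at hqd
        refine ⟨q, d', ?_, hqd⟩
        have h1 : u'' ++ [d] = cur ++ [c] ++ (q ++ [d']) := by rw [← hqd, hu', hud]
        have h2 : u''.concat d = (cur ++ [c] ++ q).concat d' := by
          simpa [List.concat_eq_append, List.append_assoc] using h1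
        have hdd : d = d' := (List.concat_inj.mp h2).2
        rw [← hdd]; exact hdsep
  · rintro (rfl | ⟨u, v, rfl, hu, hv⟩)
    · exact ⟨[], c :: cs, by simp, Or.inl rfl, Or.inr ⟨c, cs, hcsep, rfl⟩⟩
    · refine ⟨cur ++ c :: u, v, by simp, Or.inr ?_, hv⟩
      rcases hu with rfl | ⟨u'', d, hdsep, rfl⟩
      · exact ⟨cur, c, hcsep, by simp⟩
      · exact ⟨cur ++ c :: u'', d, hdsep, by simp⟩

theorem days_facts : ∀ wd ∈ pvDaysB, wd ≠ [] ∧ pvFree wd := by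
  simp [pvDaysB, pvFree]

theorem index_bridge (cur : List Char) (j : Nat) :
    PySem.List.index? pvDaysB cur = some j ↔ ∃ h : j < pvDaysB.length, pvDaysB[j] = cur := by
  unfold PySem.List.index?
  rw [List.idxOf?_eq_some_iff]
  constructor
  · rintro ⟨h, he, _⟩; exact ⟨h, he⟩
  · rintro ⟨h, he⟩
    refine ⟨h, he, fun j' hj' hcontra => ?_⟩
    have hnd : pvDaysB.Nodup := by decide
    have := (List.Nodup.getElem_inj_iff hnd).mp (hcontra.trans he.symm)
    omega

-- one flush step of the scan: the state update and its characterisation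
theorem flush_found (found : PySem.Set Int) (cur : List Char) (hnd : found.Nodup) :
    (match PySem.List.index? pvDaysB cur with
      | some i => PySem.Set.add found (i : Int)
      | none => found).Nodup ∧
    ∀ i : Int, (i ∈ (match PySem.List.index? pvDaysB cur with
      | some i => PySem.Set.add found (i : Int)
      | none => found) ↔
      i ∈ found ∨ ∃ (j : Nat) (_ : j < pvDaysB.length), i = (j : Int) ∧ pvDaysB[j] = cur) := by
  cases hidx : PySem.List.index? pvDaysB cur with
  | some j0 =>
    obtain ⟨hj0, hj0e⟩ := (index_bridge cur j0).mp hidx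
    refine ⟨PySem.Set.nodup_add found (j0 : Int) hnd, fun i => ?_⟩
    rw [PySem.Set.mem_add]
    constructor
    · rintro (h | rfl)
      · exact Or.inl h
      · exact Or.inr ⟨j0, hj0, rfl, hj0e⟩
    · rintro (h | ⟨j, hj, rfl, hje⟩)
      · exact Or.inl h
      · have : PySem.List.index? pvDaysB cur = some j := (index_bridge cur j).mpr ⟨hj, hje⟩
        rw [hidx] at this
        exact Or.inr (congrArg (fun n : Nat => (n : Int)) (Option.some.inj this)).symm
  | none =>
    refine ⟨hnd, fun i => ?_⟩
    constructor
    · exact Or.inl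
    · rintro (h | ⟨j, hj, rfl, hje⟩)
      · exact h
      · exfalso
        have : PySem.List.index? pvDaysB cur = some j := (index_bridge cur j).mpr ⟨hj, hje⟩
        rw [hidx] at this; simp at this

theorem scan_spec : ∀ (cs : List Char) (found : PySem.Set Int) (cur : List Char),
    pvFree cur → found.Nodup →
    (pvScan (cs ++ [' ']) found cur = none ↔
      pvTok "Everyday".toList (cur ++ cs) ∨ pvTok "Daily".toList (cur ++ cs)) ∧
    (∀ F, pvScan (cs ++ [' ']) found cur = some F →
      F.Nodup ∧ ∀ i : Int, (i ∈ F ↔ i ∈ found ∨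
        ∃ (j : Nat) (_ : j < pvDaysB.length), i = (j : Int) ∧ pvTok pvDaysB[j] (cur ++ cs))) := by
  intro cs
  induction cs with
  | nil =>
    intro found cur hcur hnd
    have hEV : pvTok "Everyday".toList (cur ++ []) ↔ "Everyday".toList = cur := by
      rw [List.append_nil]
      exact tok_nil _ _ hcur
    have hDA : pvTok "Daily".toList (cur ++ []) ↔ "Daily".toList = cur := by
      rw [List.append_nil]
      exact tok_nil _ _ hcur
    by_cases hstop : cur == "Everyday".toList || cur == "Daily".toList
    · have hrun : pvScan ([] ++ [' ']) found cur = none := by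
        simp only [List.nil_append, pvScan]
        rw [if_pos (by simp), if_pos hstop]
      constructor
      · rw [hrun]
        refine iff_of_true rfl ?_
        rcases Bool.or_eq_true_iff.mp hstop with h | h
        · exact Or.inl (hEV.mpr (beq_iff_eq.mp h).symm)
        · exact Or.inr (hDA.mpr (beq_iff_eq.mp h).symm)
      · intro F hF
        exfalso
        rw [hrun] at hF
        simp at hF
    · obtain ⟨hnd', hmem'⟩ := flush_found found cur hnd
      have hrun : pvScan ([] ++ [' ']) found cur =
          some (match PySem.List.index? pvDaysB cur with
            | some i => PySem.Set.add found (i : Int)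
            | none => found) := by
        simp only [List.nil_append, pvScan]
        rw [if_pos (by simp), if_neg hstop]
        cases hix : List.idxOf? cur pvDaysB <;>
          simp [PySem.List.index?, hix]
      constructor
      · rw [hrun]
        simp only [hEV, hDA]
        constructor
        · intro h; simp at h
        · rintro (h | h) <;> (exfalso; apply hstop; simp [← h])
      · intro F hF
        rw [hrun] at hF
        obtain rfl := Option.some.inj hF
        refine ⟨hnd', fun i => ?_⟩
        rw [hmem' _]
        constructor
        · rintro (h | ⟨j, hj, rfl, hje⟩)
          · exact Or.inl h
          · refine Or.inr ⟨j, hj, rfl, ?_⟩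
            rw [List.append_nil]
            rw [tok_nil _ _ hcur]
            exact hje
        · rintro (h | ⟨j, hj, rfl, hje⟩)
          · exact Or.inl h
          · refine Or.inr ⟨j, hj, rfl, ?_⟩
            rw [List.append_nil] at hje
            rw [tok_nil _ _ hcur] at hje
            exact hje
  | cons c cs' ih =>
    intro found cur hcur hnd
    by_cases hcsep : c = ' ' ∨ c = ','
    · have hsepb : (c = ' ' || c = ',') = true := by
        rcases hcsep with rfl | rfl <;> simp
      have hflushEV := tok_flush "Everyday".toList cur cs' c hcsep (by simp) (by simp [pvFree]) hcur
      have hflushDA := tok_flush "Daily".toList cur cs' c hcsep (by simp) (by simp [pvFree]) hcur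
      by_cases hstop : cur == "Everyday".toList || cur == "Daily".toList
      · have hrun : pvScan ((c :: cs') ++ [' ']) found cur = none := by
          simp only [List.cons_append, pvScan]
          rw [if_pos hsepb, if_pos hstop]
        constructor
        · rw [hrun]
          refine iff_of_true rfl ?_
          rcases Bool.or_eq_true_iff.mp hstop with h | h
          · exact Or.inl (hflushEV.mpr (Or.inl (beq_iff_eq.mp h).symm))
          · exact Or.inr (hflushDA.mpr (Or.inl (beq_iff_eq.mp h).symm))
        · intro F hF
          exfalso
          rw [hrun] at hF
          simp at hF
      · obtain ⟨hnd', hmem'⟩ := flush_found found cur hnd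
        set found' := (match PySem.List.index? pvDaysB cur with
            | some i => PySem.Set.add found (i : Int)
            | none => found) with hfound'
        have hrun : pvScan ((c :: cs') ++ [' ']) found cur = pvScan (cs' ++ [' ']) found' [] := by
          simp only [List.cons_append, pvScan]
          rw [if_pos hsepb, if_neg hstop]
          cases hix : List.idxOf? cur pvDaysB <;>
            simp [hfound', PySem.List.index?, hix]
        obtain ⟨ihnone, ihsome⟩ := ih found' [] (by intro x hx; cases hx) hnd'
        simp only [List.nil_append] at ihnone ihsome
        constructor
        · rw [hrun, ihnone]
          simp only [hflushEV, hflushDA]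
          have hne1 : ¬ ("Everyday".toList = cur) := fun h => hstop (by simp [← h])
          have hne2 : ¬ ("Daily".toList = cur) := fun h => hstop (by simp [← h])
          tauto
        · intro F hF
          rw [hrun] at hF
          obtain ⟨hFnd, hFmem⟩ := ihsome F hF
          refine ⟨hFnd, fun i => ?_⟩
          rw [hFmem i]
          have hdayflush : ∀ (j : Nat) (hj : j < pvDaysB.length),
              pvTok pvDaysB[j] (cur ++ c :: cs') ↔ pvDaysB[j] = cur ∨ pvTok pvDaysB[j] cs' :=
            fun j hj => tok_flush _ cur cs' c hcsep (days_facts _ (List.getElem_mem hj)).1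
              (days_facts _ (List.getElem_mem hj)).2 hcur
          constructor
          · rintro (hmem | ⟨j, hj, rfl, hje⟩)
            · rcases (hmem' _).mp hmem with h | ⟨j, hj, rfl, hje⟩
              · exact Or.inl h
              · exact Or.inr ⟨j, hj, rfl, (hdayflush j hj).mpr (Or.inl hje)⟩
            · exact Or.inr ⟨j, hj, rfl, (hdayflush j hj).mpr (Or.inr hje)⟩
          · rintro (hmem | ⟨j, hj, rfl, hje⟩)
            · exact Or.inl ((hmem' _).mpr (Or.inl hmem))
            · rcases (hdayflush j hj).mp hje with h | h
              · exact Or.inl ((hmem' _).mpr (Or.inr ⟨j, hj, rfl, h⟩))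
              · exact Or.inr ⟨j, hj, rfl, h⟩
    · have hsepb : (c = ' ' || c = ',') = false := by
        simp only [Bool.or_eq_false_iff, decide_eq_false_iff_not]
        exact ⟨fun h => hcsep (Or.inl h), fun h => hcsep (Or.inr h)⟩
      have hcur' : pvFree (cur ++ [c]) := by
        intro x hx
        rcases List.mem_append.mp hx with h | h
        · exact hcur x h
        · simp at h; subst h
          exact ⟨fun h => hcsep (Or.inl h), fun h => hcsep (Or.inr h)⟩
      have hrun : pvScan ((c :: cs') ++ [' ']) found cur = pvScan (cs' ++ [' ']) found (cur ++ [c]) := by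
        simp only [List.cons_append, pvScan, hsepb, Bool.false_eq_true, if_false]
      have happ : (cur ++ [c]) ++ cs' = cur ++ c :: cs' := by simp
      obtain ⟨ihnone, ihsome⟩ := ih found (cur ++ [c]) hcur' hnd
      rw [happ] at ihnone ihsome
      exact ⟨hrun ▸ ihnone, fun F hF => ihsome F (hrun ▸ hF)⟩

theorem zipIdx_mem_iff {α : Type} (xs : List α) (pr : α × Nat) :
    pr ∈ xs.zipIdx ↔ ∃ (j : Nat) (h : j < xs.length), pr = (xs[j], j) := by
  constructor
  · intro h
    obtain ⟨x, i⟩ := pr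
    have := List.mem_zipIdx h
    exact ⟨i, by omega, by simp [this.2.2]⟩
  · rintro ⟨j, hj, rfl⟩
    have hj' : j < xs.zipIdx.length := by simpa using hj
    have : xs.zipIdx[j]'hj' = (xs[j], j) := by
      simp [List.getElem_zipIdx]
    rw [← this]
    exact List.getElem_mem hj'

-- A's fold computes the filtered power sum
theorem fold_dates (q : List Char → Bool) :
    ∀ (ws : List (List Char)) (acc : Int) (k : Nat),
    ws.foldl (fun (p : Int × Nat) day => (if q day then p.1 + 10 ^ p.2 else p.1, p.2 + 1)) (acc, k)
      = (acc + (((ws.zipIdx k).filter (fun pr => q pr.1)).map (fun pr => (10 : Int) ^ pr.2)).sum,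
         k + ws.length) := by
  intro ws
  induction ws with
  | nil => intro acc k; simp
  | cons a ws ih =>
    intro acc k
    simp only [List.foldl_cons, List.zipIdx_cons, List.filter_cons]
    by_cases h : q a
    · simp [h, ih, add_assoc]; omega
    · simp [h, ih]; omega

-- ===== VERDICT (by name: the statement is the Claim_ definition above) =====
theorem checkForDays_spec : Claim_equal_checkForDays := by
  intro dayString _hdom
  unfold Spec_checkForDays
  obtain ⟨hnone, hsome⟩ := scan_spec dayString.toList PySem.Set.empty []
    (by intro c hc; cases hc) List.nodup_nil
  simp only [List.nil_append] at hnone hsome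
  by_cases h1 : pvSepCheck dayString.toList "Everyday".toList = true
  · have hsc : pvScan (dayString.toList ++ [' ']) PySem.Set.empty [] = none :=
      hnone.mpr (Or.inl ((sep_iff_tok _ _).mp h1))
    unfold checkForDays checkForDays_alt
    rw [if_pos h1, hsc]
  · by_cases h2 : pvSepCheck dayString.toList "Daily".toList = true
    · have hsc : pvScan (dayString.toList ++ [' ']) PySem.Set.empty [] = none :=
        hnone.mpr (Or.inr ((sep_iff_tok _ _).mp h2))
      unfold checkForDays checkForDays_alt
      rw [if_neg h1, if_pos h2, hsc]
    · -- neither Everyday nor Daily occurs: compare the day sums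
      have hne : pvScan (dayString.toList ++ [' ']) PySem.Set.empty [] ≠ none := by
        intro h
        rcases hnone.mp h with h' | h'
        · exact h1 ((sep_iff_tok _ _).mpr h')
        · exact h2 ((sep_iff_tok _ _).mpr h')
      obtain ⟨F, hF⟩ := Option.ne_none_iff_exists'.mp hne
      obtain ⟨hFnd, hFmem⟩ := hsome F hF
      -- canonical index list, in increasing day order
      set CL := (((pvDaysA.zipIdx).filter (fun pr => pvSepCheck dayString.toList pr.1)).map
        (fun pr => ((pr.2 : Nat) : Int))) with hCL
      have hCLnd : CL.Nodup := by
        have hsub : List.Sublist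
            (((pvDaysA.zipIdx).filter (fun pr => pvSepCheck dayString.toList pr.1)).map
              (fun pr => ((pr.2 : Nat) : Int)))
            ((pvDaysA.zipIdx).map (fun pr => ((pr.2 : Nat) : Int))) :=
          List.Sublist.map _ List.filter_sublist
        have : ((pvDaysA.zipIdx).map (fun pr => ((pr.2 : Nat) : Int))).Nodup := by decide
        exact (hsub.nodup this)
      have hCLmem : ∀ i : Int, i ∈ CL ↔
          ∃ (j : Nat) (_ : j < pvDaysA.length), i = (j : Int) ∧
            pvSepCheck dayString.toList pvDaysA[j] = true := by
        intro i
        rw [hCL]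
        simp only [List.mem_map, List.mem_filter]
        constructor
        · rintro ⟨pr, ⟨hmem, hp⟩, rfl⟩
          obtain ⟨j, hj, rfl⟩ := (zipIdx_mem_iff _ _).mp hmem
          exact ⟨j, hj, rfl, hp⟩
        · rintro ⟨j, hj, rfl, hp⟩
          exact ⟨(pvDaysA[j], j), ⟨(zipIdx_mem_iff _ _).mpr ⟨j, hj, rfl⟩, hp⟩, rfl⟩
      have hBA : pvDaysB = pvDaysA := rfl
      have hFmem' : ∀ i : Int, i ∈ F ↔
          ∃ (j : Nat) (_ : j < pvDaysA.length), i = (j : Int) ∧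
            pvSepCheck dayString.toList pvDaysA[j] = true := by
        intro i
        rw [hFmem i]
        have hd : ∀ (j : Nat) (hj : j < pvDaysA.length),
            pvTok pvDaysA[j] dayString.toList ↔ pvSepCheck dayString.toList pvDaysA[j] = true :=
          fun j hj => (sep_iff_tok _ _).symm
        constructor
        · rintro (h | ⟨j, hj, rfl, hje⟩)
          · cases h
          · have hj' : j < pvDaysA.length := hj
            exact ⟨j, hj', rfl, (hd j hj').mp hje⟩
        · rintro ⟨j, hj, rfl, hje⟩
          have hj' : j < pvDaysB.length := hj
          exact Or.inr ⟨j, hj', rfl, (hd j hj).mpr hje⟩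
      have hperm : F.Perm CL :=
        (List.perm_ext_iff_of_nodup hFnd hCLnd).mpr (fun i => (hFmem' i).trans (hCLmem i).symm)
      -- A's sum
      have hfold := fold_dates (fun day => pvSepCheck dayString.toList day) pvDaysA 0 0
      have hmapmap : CL.map (fun i => (10 : Int) ^ i.toNat) =
          (((pvDaysA.zipIdx).filter (fun pr => pvSepCheck dayString.toList pr.1)).map
            (fun pr => (10 : Int) ^ pr.2)) := by
        rw [hCL, List.map_map]
        simp
      have hsum : (F.map (fun i => (10 : Int) ^ i.toNat)).sum
          = (((pvDaysA.zipIdx).filter (fun pr => pvSepCheck dayString.toList pr.1)).map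
            (fun pr => (10 : Int) ^ pr.2)).sum := by
        rw [(hperm.map (fun i => (10 : Int) ^ i.toNat)).sum_eq, hmapmap]
      unfold checkForDays checkForDays_alt
      rw [if_neg h1, if_neg h2, hF]
      simp only [hfold, zero_add]
      by_cases hCL0 : CL = []
      · have hF0 : F = [] := (hCL0 ▸ hperm).eq_nil
        have hfilter0 : ((pvDaysA.zipIdx).filter (fun pr => pvSepCheck dayString.toList pr.1)) = [] := by
          rw [hCL] at hCL0
          exact List.map_eq_nil_iff.mp hCL0
        rw [hfilter0]
        simp [hF0]
      · have hF0 : F ≠ [] := fun h => hCL0 ((h ▸ hperm).symm.eq_nil.symm ▸ rfl)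
        have hpos : 0 < (((pvDaysA.zipIdx).filter (fun pr => pvSepCheck dayString.toList pr.1)).map
            (fun pr => (10 : Int) ^ pr.2)).sum := by
          rw [← hmapmap]
          apply List.sum_pos
          · intro x hx
            obtain ⟨i, _, rfl⟩ := List.mem_map.mp hx
            positivity
          · intro h
            exact hCL0 (List.map_eq_nil_iff.mp h)
        rw [if_neg (by omega), if_neg hF0]
        exact hsum.symm
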